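-- pv_equiv track=rewrite | github.com/olivierdenis/Termization | termization.py | numberlist
-- ===== SOURCE A (Python) =====
-- def numberlist(nums, limit):
--     prefix = []
--     sum = 0
--     for num in nums:
--         sum += num
--         prefix.append(num)
--         if sum > limit:
--             del prefix[-1]
--             return prefix
-- ===== SOURCE B (Python) =====
-- def numberlist(nums, limit):
--     nums = list(nums)
--     cumsums = []
--     total = 0
--     for num in nums:
--         total += num
--         cumsums.append(total)
--     for i, c in enumerate(cumsums):
--         if c > limit:
--             return nums[:i]
--     return None
-- ===== Notes on version B (the rewrite author's own statement) =====
-- stated objective: alternative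
-- what changed: Two-phase decomposition: first materialize the full cumulative-sum table, then scan it for the first index exceeding the limit and slice the input there, instead of interleaving summation, prefix building and early return in one loop.
import Mathlib
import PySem

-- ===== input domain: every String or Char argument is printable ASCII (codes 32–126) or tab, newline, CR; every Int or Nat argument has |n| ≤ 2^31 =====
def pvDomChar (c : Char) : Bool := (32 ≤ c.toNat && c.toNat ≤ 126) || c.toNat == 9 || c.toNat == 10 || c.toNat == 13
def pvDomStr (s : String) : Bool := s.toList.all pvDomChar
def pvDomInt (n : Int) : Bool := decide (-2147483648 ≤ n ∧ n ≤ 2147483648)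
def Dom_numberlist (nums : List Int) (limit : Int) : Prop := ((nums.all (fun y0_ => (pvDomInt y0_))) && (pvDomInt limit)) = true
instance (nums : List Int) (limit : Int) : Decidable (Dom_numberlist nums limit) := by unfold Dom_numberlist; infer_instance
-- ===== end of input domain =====

-- B changes the decomposition: it materializes the cumulative-sum table first, then scans it
-- for the first index exceeding the limit and slices; same cost, no speed claim.

-- ===== PORT A =====
-- A's single loop: accumulate sum, append to prefix, on overflow drop the last element and return.
def numberlistGo (limit : Int) (pre : List Int) (sum : Int) : List Int → Option (List Int)
  | [] => none
  | num :: rest =>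
      let sum' := sum + num
      let pre' := pre ++ [num]
      if sum' > limit then some pre'.dropLast else numberlistGo limit pre' sum' rest

def numberlist (nums : List Int) (limit : Int) : Option (List Int) :=
  numberlistGo limit [] 0 nums

-- ===== PORT B =====
-- phase 1 of Source B: build the cumulative-sum table
def cumsumsB (total : Int) : List Int → List Int
  | [] => []
  | num :: rest => (total + num) :: cumsumsB (total + num) rest

-- phase 2 of Source B: enumerate the table, return index of first entry > limit
def findOverB (limit : Int) (i : Nat) : List Int → Option Nat
  | [] => none
  | c :: rest => if c > limit then some i else findOverB limit (i + 1) rest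

def numberlist_alt (nums : List Int) (limit : Int) : Option (List Int) :=
  let cumsums := cumsumsB 0 nums
  match findOverB limit 0 cumsums with
  | some i => some (nums.take i)   -- nums[:i], i ≥ 0
  | none => none

-- ===== PRECONDITION & SPEC =====
def Spec_numberlist (nums : List Int) (limit : Int) (out : Option (List Int)) : Prop := out = numberlist_alt nums limit
instance (nums : List Int) (limit : Int) (out : Option (List Int)) : Decidable (Spec_numberlist nums limit out) := by unfold Spec_numberlist; infer_instance

-- ===== CLAIM (what is proved, stated in full; the proofs are below) =====
def Claim_equal_numberlist : Prop := ∀ (nums : List Int) (limit : Int), Dom_numberlist nums limit → Spec_numberlist nums limit (numberlist nums limit)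

-- ===== LEMMAS AND PROOFS =====
theorem findOverB_shift (limit : Int) (cs : List Int) (i : Nat) :
    findOverB limit i cs = (findOverB limit 0 cs).map (· + i) := by
  induction cs generalizing i with
  | nil => simp [findOverB]
  | cons c rest ih =>
    simp only [findOverB]
    split_ifs with h
    · simp
    · rw [ih (i + 1), ih 1]
      cases findOverB limit 0 rest <;> simp <;> omega

theorem numberlistGo_eq (limit : Int) (rest : List Int) :
    ∀ (pre : List Int) (sum : Int),
    numberlistGo limit pre sum rest =
      (findOverB limit 0 (cumsumsB sum rest)).map (fun i => pre ++ rest.take i) := by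
  induction rest with
  | nil => intro pre sum; simp [numberlistGo, cumsumsB, findOverB]
  | cons num rest ih =>
    intro pre sum
    simp only [numberlistGo, cumsumsB, findOverB]
    split_ifs with h
    · simp
    · rw [ih (pre ++ [num]) (sum + num), findOverB_shift limit (cumsumsB (sum + num) rest) 1]
      cases findOverB limit 0 (cumsumsB (sum + num) rest) <;> simp [List.take_succ_cons]

-- ===== VERDICT (by name: the statement is the Claim_ definition above) =====
theorem numberlist_spec : Claim_equal_numberlist := by
  intro nums limit _
  unfold Spec_numberlist numberlist numberlist_alt
  rw [numberlistGo_eq]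
  cases h : findOverB limit 0 (cumsumsB 0 nums) <;> simp [h]
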